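-- pv_equiv track=rewrite | github.com/destroyer42/StableNew2 | archive/legacy_tests/test_prompt_editor.py | parse_prompt_pack_text
-- ===== SOURCE A (Python) =====
-- def parse_prompt_pack_text(content):
--     """Parse prompt pack text into positive and negative prompts."""
--     positives = []
--     negatives = []
--     blocks = content.split("\n\n")
--     for block in blocks:
--         block = block.strip()
--         if not block or all(line.startswith("#") for line in block.splitlines() if line.strip()):
--             continue
--         lines = [line.strip() for line in block.splitlines()]
--         lines = [line for line in lines if line and not line.startswith("#")]
--         for line in lines:
--             if line.startswith("neg:"):
--                 neg_content = line[4:].strip()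
--                 if neg_content:
--                     negatives.append(neg_content)
--             else:
--                 positives.append(line)
--     return positives, negatives
-- ===== SOURCE B (Python) =====
-- def parse_prompt_pack_text(content):
--     """Parse prompt pack text into positive and negative prompts."""
--     positives = []
--     negatives = []
--     for raw in content.splitlines():
--         s = raw.strip()
--         if not s or s.startswith("#"):
--             continue
--         if s.startswith("neg:"):
--             neg = s[4:].strip()
--             if neg:
--                 negatives.append(neg)
--         else:
--             positives.append(s)
--     return positives, negatives
-- ===== Notes on version B (the rewrite author's own statement) =====
-- stated objective: simpler
-- what changed: Replaced the two-level parse (split into "\n\n" blocks, per-block strip, all-comment block guard, per-block line list rebuild, inner loop) by a single pass over content.splitlines() that strips each line and dispatches it directly; the block-level guard is redundant and provably never changes the output.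
import Mathlib
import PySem

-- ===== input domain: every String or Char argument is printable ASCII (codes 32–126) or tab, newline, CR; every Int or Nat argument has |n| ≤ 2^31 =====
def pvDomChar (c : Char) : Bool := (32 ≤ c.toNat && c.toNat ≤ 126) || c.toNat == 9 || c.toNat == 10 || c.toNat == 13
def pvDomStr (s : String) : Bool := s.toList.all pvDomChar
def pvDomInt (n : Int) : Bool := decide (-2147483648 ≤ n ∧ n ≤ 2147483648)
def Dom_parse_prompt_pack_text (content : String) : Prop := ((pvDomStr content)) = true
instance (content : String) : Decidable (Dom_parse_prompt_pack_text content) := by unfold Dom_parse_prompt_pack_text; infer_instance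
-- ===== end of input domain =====

-- B replaces A's two-level parse (blank-line "\n\n" blocks with a redundant all-comment block guard,
-- then a per-block line loop) by one pass over content.splitlines(); objective: simpler, same value.

-- ===== PORT A =====
def parse_prompt_pack_text (content : String) : List String × List String :=
  let blocks := (PySem.Str.split? content "\n\n").getD []
  blocks.foldl (fun acc block0 =>
    let block := PySem.Str.strip block0
    if block = "" ∨ (((PySem.Str.splitlines block).filter
          (fun line => !(PySem.Str.strip line = ""))).all
          (fun line => PySem.Str.startswith line "#")) = true then acc
    else
      let lines1 := (PySem.Str.splitlines block).map (fun line => PySem.Str.strip line)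
      let lines := lines1.filter (fun line => !(line = "") && !(PySem.Str.startswith line "#"))
      lines.foldl (fun acc line =>
        if PySem.Str.startswith line "neg:" then
          let neg_content := PySem.Str.strip (PySem.Str.slice line (some 4) none)
          if !(neg_content = "") then (acc.1, acc.2 ++ [neg_content]) else acc
        else (acc.1 ++ [line], acc.2)) acc) (([], []) : List String × List String)

-- ===== PORT B =====
def parse_prompt_pack_text_alt (content : String) : List String × List String :=
  (PySem.Str.splitlines content).foldl (fun acc raw =>
    let s := PySem.Str.strip raw
    if s = "" ∨ PySem.Str.startswith s "#" = true then acc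
    else if PySem.Str.startswith s "neg:" then
      let neg := PySem.Str.strip (PySem.Str.slice s (some 4) none)
      if !(neg = "") then (acc.1, acc.2 ++ [neg]) else acc
    else (acc.1 ++ [s], acc.2)) (([], []) : List String × List String)

-- ===== PRECONDITION & SPEC =====
def Spec_parse_prompt_pack_text (content : String) (out : List String × List String) : Prop := out = parse_prompt_pack_text_alt content
instance (content : String) (out : List String × List String) : Decidable (Spec_parse_prompt_pack_text content out) := by unfold Spec_parse_prompt_pack_text; infer_instance

-- ===== CLAIM (what is proved, stated in full; the proofs are below) =====
def Claim_equal_parse_prompt_pack_text : Prop := ∀ (content : String), Dom_parse_prompt_pack_text content → Spec_parse_prompt_pack_text content (parse_prompt_pack_text content)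

-- ===== LEMMAS AND PROOFS =====

def isBreak (c : Char) : Bool :=
  have n := c.toNat
  decide (n = 10) || decide (n = 13) || decide (n = 11) || decide (n = 12) || decide (n = 28) || decide (n = 29) ||
          decide (n = 30) ||
        decide (n = 133) ||
      decide (n = 8232) ||
    decide (n = 8233)
def pf (p : List Char) : List (List Char) → List (List Char)
  | [] => if p.isEmpty then [] else [p]
  | h :: t => (p ++ h) :: t
def slRec : List Char → List (List Char)
  | [] => []
  | '\r' :: '\n' :: r => [] :: slRec r
  | c :: r => if isBreak c then [] :: slRec r else pf [c] (slRec r)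

theorem pf_nil_left (L : List (List Char)) : pf [] L = L := by cases L <;> simp [pf]
theorem pf_assoc (a b : List Char) (L : List (List Char)) : pf a (pf b L) = pf (a ++ b) L := by
  cases L with
  | nil => by_cases hb : b = [] <;> by_cases ha : a = [] <;> simp_all [pf, List.isEmpty_iff]
  | cons h t => simp [pf]

theorem splitlines_go_eq (s : List Char) : ∀ (cur : List Char) (acc : List (List Char)),
    PySem.Chars.splitlines.go isBreak s cur acc = acc.reverse ++ pf cur.reverse (slRec s) := by
  induction s using slRec.induct with
  | case1 =>
    intro cur acc
    rw [PySem.Chars.splitlines.go, slRec]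
    by_cases h : cur = [] <;> simp [h, pf, List.isEmpty_iff]
  | case2 r ih =>
    intro cur acc
    rw [PySem.Chars.splitlines.go, slRec, ih]
    cases hr : slRec r <;> simp [pf]
  | case3 c r hm hb ih =>
    intro cur acc
    rw [PySem.Chars.splitlines.go.eq_3 _ _ _ _ _ hm, slRec.eq_3 _ _ hm, if_pos hb, if_pos hb, ih]
    cases hr : slRec r <;> simp [pf]
  | case4 c r hm hb ih =>
    intro cur acc
    rw [PySem.Chars.splitlines.go.eq_3 _ _ _ _ _ hm, slRec.eq_3 _ _ hm, if_neg hb, if_neg hb, ih]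
    rw [pf_assoc]
    congr 1
    simp

theorem splitlines_eq_slRec (s : List Char) : PySem.Chars.splitlines s = slRec s := by
  show PySem.Chars.splitlines.go isBreak s [] [] = _
  rw [splitlines_go_eq]
  simp [pf_nil_left]

theorem pf_append (a : List Char) {L : List (List Char)} (M : List (List Char)) (h : L ≠ []) :
    pf a (L ++ M) = pf a L ++ M := by
  cases L with
  | nil => exact absurd rfl h
  | cons x t => simp [pf]

theorem pf_ne_nil {a : List Char} (ha : a ≠ []) (L : List (List Char)) : pf a L ≠ [] := by
  cases L <;> simp_all [pf, List.isEmpty_iff]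

theorem slRec_eq_nil {s : List Char} (h : slRec s = []) : s = [] := by
  induction s using slRec.induct with
  | case1 => rfl
  | case2 r ih => rw [slRec] at h; exact absurd h (by simp)
  | case3 c r hm hb ih => rw [slRec.eq_3 _ _ hm, if_pos hb] at h; exact absurd h (by simp)
  | case4 c r hm hb ih => rw [slRec.eq_3 _ _ hm, if_neg hb] at h; exact absurd h (pf_ne_nil (by simp) _)

theorem slRec_ne_nil {s : List Char} (h : s ≠ []) : slRec s ≠ [] :=
  fun hs => h (slRec_eq_nil hs)

theorem not_isBreak_ne_cr {c : Char} (hb : ¬ isBreak c = true) : c ≠ '\r' := by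
  intro h; subst h; exact hb (by decide)

theorem slRec_cons_break {c : Char} (hb : isBreak c = true) (hc : c ≠ '\r') (r : List Char) :
    slRec (c :: r) = [] :: slRec r := by
  rw [slRec.eq_3 _ _ (fun r1 h => absurd h hc), if_pos hb]

theorem slRec_cr_cons {d : Char} (hd : d ≠ '\n') (r : List Char) :
    slRec ('\r' :: d :: r) = [] :: slRec (d :: r) := by
  rw [slRec.eq_3 _ _ (by intro r1 _ h; injection h with h1; exact hd h1), if_pos (by decide)]

theorem slRec_cons_other {c : Char} (hb : ¬ isBreak c = true) (r : List Char) :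
    slRec (c :: r) = pf [c] (slRec r) := by
  rw [slRec.eq_3 _ _ (fun r1 h => absurd h (not_isBreak_ne_cr hb)), if_neg hb]

theorem slRec_append_newline (p r : List Char) :
    slRec (p ++ '\n' :: r) = slRec (p ++ ['\n']) ++ slRec r := by
  induction p using slRec.induct with
  | case1 =>
    simp only [List.nil_append]
    rw [slRec_cons_break (by decide) (by decide)]
    have h1 : slRec ['\n'] = [[]] := by decide
    rw [h1]; rfl
  | case2 p' ih =>
    simp only [List.cons_append]
    rw [slRec.eq_2, slRec.eq_2, ih]
    rfl
  | case3 c p' hm hb ih =>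
    by_cases hc : c = '\r'
    · subst hc
      cases p' with
      | nil =>
        simp only [List.nil_append, List.cons_append]
        rw [slRec.eq_2]
        have : slRec ['\r', '\n'] = [[]] := by decide
        rw [this]; rfl
      | cons d p'' =>
        have hd : d ≠ '\n' := fun h => hm p'' rfl (by rw [h])
        simp only [List.cons_append]
        rw [slRec_cr_cons hd, slRec_cr_cons hd]
        simp only [← List.cons_append, ih]
    · simp only [List.cons_append]
      rw [slRec_cons_break hb hc, slRec_cons_break hb hc, ih]
      rfl
  | case4 c p' hm hb ih =>
    simp only [List.cons_append]
    rw [slRec_cons_other hb, slRec_cons_other hb, ih,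
        pf_append _ _ (slRec_ne_nil (by simp))]

theorem slRec_singleton (c : Char) : slRec [c] = if isBreak c = true then [[]] else [[c]] := by
  rw [slRec.eq_3 _ _ (by intro r1 _ h; cases h)]
  by_cases hb : isBreak c = true <;> simp [hb, slRec, pf]

theorem slRec_append_ws {c : Char} (hc : PySem.Chars.isspace c = true) (p : List Char) :
    slRec (p ++ [c]) = slRec p ∨ slRec (p ++ [c]) = slRec p ++ [[]] ∨
    slRec (p ++ [c]) = slRec p ++ [[c]] ∨
    ∃ L h, slRec p = L ++ [h] ∧ slRec (p ++ [c]) = L ++ [h ++ [c]] := by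
  induction p using slRec.induct with
  | case1 =>
    simp only [List.nil_append, slRec_singleton, slRec]
    by_cases hb : isBreak c = true
    · right; left; simp [hb]
    · right; right; left; simp [hb]
  | case2 p' ih =>
    simp only [List.cons_append, slRec.eq_2]
    rcases ih with h | h | h | ⟨L, hh, e1, e2⟩
    · left; simp [h]
    · right; left; simp [h]
    · right; right; left; simp [h]
    · right; right; right
      exact ⟨[] :: L, hh, by simp [e1], by simp [e2]⟩
  | case3 c0 p' hm hb ih =>
    by_cases hc0 : c0 = '\r'
    · subst hc0
      cases p' with
      | nil =>
        by_cases hcn : c = '\n'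
        · subst hcn; left; decide
        · have h1 : slRec ['\r'] = [[]] := by decide
          rw [show (['\r'] ++ [c]) = ['\r', c] from rfl, slRec_cr_cons hcn, h1, slRec_singleton]
          by_cases hbc : isBreak c = true
          · right; left; simp [hbc]
          · right; right; left; simp [hbc]
      | cons d p'' =>
        have hd : d ≠ '\n' := fun h => hm p'' rfl (by simp [h])
        simp only [List.cons_append] at ih ⊢
        rw [slRec_cr_cons hd, slRec_cr_cons hd]
        rcases ih with h | h | h | ⟨L, hh, e1, e2⟩
        · left; simp [h]
        · right; left; simp [h]
        · right; right; left; simp [h]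
        · right; right; right
          exact ⟨[] :: L, hh, by simp [e1], by simp [e2]⟩
    · simp only [List.cons_append]
      rw [slRec_cons_break hb hc0, slRec_cons_break hb hc0]
      rcases ih with h | h | h | ⟨L, hh, e1, e2⟩
      · left; simp [h]
      · right; left; simp [h]
      · right; right; left; simp [h]
      · right; right; right
        exact ⟨[] :: L, hh, by simp [e1], by simp [e2]⟩
  | case4 c0 p' hm hb ih =>
    simp only [List.cons_append]
    rw [slRec_cons_other hb, slRec_cons_other hb]
    rcases ih with h | h | h | ⟨L, hh, e1, e2⟩
    · left; simp [h]
    · cases hsp : slRec p' with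
      | nil => left; rw [h, hsp]; rfl
      | cons x t =>
        right; left
        rw [h, hsp, pf_append _ _ (by simp)]
    · cases hsp : slRec p' with
      | nil =>
        right; right; right
        exact ⟨[], [c0], by simp [pf], by simp [h, hsp, pf]⟩
      | cons x t =>
        right; right; left
        rw [h, hsp, pf_append _ _ (by simp)]
    · cases L with
      | nil =>
        right; right; right
        refine ⟨[], c0 :: hh, ?_, ?_⟩
        · rw [e1]; rfl
        · rw [e2]; rfl
      | cons l0 L' =>
        right; right; right
        refine ⟨(c0 :: l0) :: L', hh, ?_, ?_⟩
        · rw [e1]; rfl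
        · rw [e2]; rfl

def keep (l : List Char) : Bool := !(l.isEmpty) && !(PySem.Chars.startswith l ['#'])

def cl (L : List (List Char)) : List (List Char) := (L.map PySem.Chars.strip).filter keep

def step (acc : List String × List String) (line : List Char) : List String × List String :=
  if PySem.Chars.startswith line "neg:".toList then
    let neg := PySem.Chars.strip (PySem.Chars.slice line (some 4) none)
    if !(neg.isEmpty) then (acc.1, acc.2 ++ [String.ofList neg]) else acc
  else (acc.1 ++ [String.ofList line], acc.2)

theorem cl_append (L M : List (List Char)) : cl (L ++ M) = cl L ++ cl M := by
  simp [cl]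

theorem cl_cons (x : List Char) (L : List (List Char)) :
    cl (x :: L) = (if keep (PySem.Chars.strip x) then [PySem.Chars.strip x] else []) ++ cl L := by
  by_cases h : keep (PySem.Chars.strip x) = true <;> simp [cl, h]

theorem strip_nil : PySem.Chars.strip [] = [] := by decide

theorem keep_nil : keep [] = false := by decide

theorem cl_nil_cons (L : List (List Char)) : cl ([] :: L) = cl L := by
  rw [cl_cons, strip_nil, keep_nil]; rfl

theorem rstrip_append_ws {c : Char} (hc : PySem.Chars.isspace c = true) (x : List Char) :
    PySem.Chars.rstrip (x ++ [c]) = PySem.Chars.rstrip x := by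
  simp [PySem.Chars.rstrip, hc]

theorem strip_cons_ws {c : Char} (hc : PySem.Chars.isspace c = true) (h : List Char) :
    PySem.Chars.strip (c :: h) = PySem.Chars.strip h := by
  simp [PySem.Chars.strip, PySem.Chars.lstrip, List.dropWhile, hc]

theorem strip_append_ws {c : Char} (hc : PySem.Chars.isspace c = true) (h : List Char) :
    PySem.Chars.strip (h ++ [c]) = PySem.Chars.strip h := by
  unfold PySem.Chars.strip PySem.Chars.lstrip
  rw [List.dropWhile_append]
  by_cases hd : (h.dropWhile PySem.Chars.isspace).isEmpty = true
  · rw [if_pos hd]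
    simp only [List.isEmpty_iff] at hd
    rw [hd]
    simp [List.dropWhile, hc, PySem.Chars.rstrip]
  · rw [if_neg hd]
    exact rstrip_append_ws hc _

theorem strip_ws_singleton {c : Char} (hc : PySem.Chars.isspace c = true) :
    PySem.Chars.strip [c] = [] := by
  rw [show [c] = [] ++ [c] from rfl, strip_append_ws hc, strip_nil]

theorem cl_slRec_append_ws {c : Char} (hc : PySem.Chars.isspace c = true) (p : List Char) :
    cl (slRec (p ++ [c])) = cl (slRec p) := by
  rcases slRec_append_ws hc p with h | h | h | ⟨L, hh, e1, e2⟩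
  · rw [h]
  · rw [h, cl_append, cl_cons, strip_nil, keep_nil]
    simp [cl]
  · rw [h, cl_append, cl_cons, strip_ws_singleton hc]
    simp [cl, keep_nil]
  · rw [e1, e2, cl_append, cl_append, cl_cons, cl_cons, strip_append_ws hc]

theorem cl_slRec_cons_ws {c : Char} (hc : PySem.Chars.isspace c = true) (r : List Char) :
    cl (slRec (c :: r)) = cl (slRec r) := by
  by_cases hcr : c = '\r'
  · subst hcr
    cases r with
    | nil => decide
    | cons d r' =>
      by_cases hd : d = '\n'
      · subst hd
        rw [slRec.eq_2, cl_nil_cons]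
        have : PySem.Chars.isspace '\n' = true := by decide
        exact (cl_slRec_cons_ws this r').symm
      · rw [slRec_cr_cons hd, cl_nil_cons]
  · by_cases hb : isBreak c = true
    · rw [slRec_cons_break hb hcr, cl_nil_cons]
    · rw [slRec_cons_other hb]
      cases hsr : slRec r with
      | nil => simp [pf, cl, keep, strip_ws_singleton hc]
      | cons x t =>
        rw [show pf [c] (x :: t) = (c :: x) :: t from rfl, cl_cons, cl_cons, strip_cons_ws hc]

theorem cl_slRec_lstrip (b : List Char) : cl (slRec (PySem.Chars.lstrip b)) = cl (slRec b) := by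
  induction b with
  | nil => rfl
  | cons c r ih =>
    by_cases hc : PySem.Chars.isspace c = true
    · rw [show PySem.Chars.lstrip (c :: r) = PySem.Chars.lstrip r by
          simp [PySem.Chars.lstrip, List.dropWhile, hc],
        ih, cl_slRec_cons_ws hc]
    · rw [show PySem.Chars.lstrip (c :: r) = c :: r by
          simp [PySem.Chars.lstrip, List.dropWhile, hc]]

theorem cl_slRec_dropWhile_rev (rv : List Char) :
    cl (slRec (rv.dropWhile PySem.Chars.isspace).reverse) = cl (slRec rv.reverse) := by
  induction rv with
  | nil => rfl
  | cons c r ih =>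
    by_cases hc : PySem.Chars.isspace c = true
    · rw [List.dropWhile_cons_of_pos hc, ih, List.reverse_cons, cl_slRec_append_ws hc]
    · rw [List.dropWhile_cons_of_neg hc]

theorem cl_slRec_strip (b : List Char) : cl (slRec (PySem.Chars.strip b)) = cl (slRec b) := by
  unfold PySem.Chars.strip
  have h1 : PySem.Chars.rstrip (PySem.Chars.lstrip b)
      = ((PySem.Chars.lstrip b).reverse.dropWhile PySem.Chars.isspace).reverse := rfl
  rw [h1]
  rw [show cl (slRec (((PySem.Chars.lstrip b).reverse.dropWhile PySem.Chars.isspace).reverse))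
      = cl (slRec ((PySem.Chars.lstrip b).reverse.reverse)) from by
    rw [cl_slRec_dropWhile_rev]]
  rw [List.reverse_reverse, cl_slRec_lstrip]

theorem cl_slRec_blank (p r : List Char) :
    cl (slRec (p ++ '\n' :: '\n' :: r)) = cl (slRec p) ++ cl (slRec r) := by
  rw [slRec_append_newline, cl_append]
  have hn : PySem.Chars.isspace '\n' = true := by decide
  rw [show (p ++ ['\n']) = p ++ ['\n'] from rfl, cl_slRec_append_ws hn]
  have h2 : slRec ('\n' :: r) = [] :: slRec r := slRec_cons_break (by decide) (by decide) r
  rw [h2, cl_nil_cons]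

theorem splitOn_go_flat (fuel : Nat) : ∀ (l cur : List Char) (acc : List (List Char)),
    l.length + 1 ≤ fuel →
    (PySem.Chars.splitOn.go ['\n', '\n'] fuel l cur acc).flatMap (fun b => cl (slRec b)) =
      acc.reverse.flatMap (fun b => cl (slRec b)) ++ cl (slRec (cur.reverse ++ l)) := by
  induction fuel with
  | zero => intro l cur acc h; omega
  | succ f ih =>
    intro l cur acc h
    cases l with
    | nil =>
      rw [PySem.Chars.splitOn.go.eq_2 _ _ _ _ (by omega)]
      simp [List.flatMap_append]
    | cons c rest =>
      rw [PySem.Chars.splitOn.go.eq_3]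
      by_cases hp : List.isPrefixOf ['\n', '\n'] (c :: rest) = true
      · cases rest with
        | nil => simp [List.isPrefixOf] at hp
        | cons d t =>
        simp only [List.isPrefixOf, Bool.and_eq_true, beq_iff_eq]
            at hp
        obtain ⟨hc', hd', -⟩ := hp
        subst hc'; subst hd'
        rw [if_pos (by simp [List.isPrefixOf])]
        have hlen : t.length + 1 ≤ f := by simp at h; omega
        rw [show List.drop (['\n', '\n'] : List Char).length ('\n' :: '\n' :: t) = t from rfl]
        rw [ih t [] (cur.reverse :: acc) hlen]
        simp only [List.reverse_cons, List.flatMap_append, List.reverse_nil, List.nil_append,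
          List.flatMap_cons, List.flatMap_nil, List.append_nil]
        rw [cl_slRec_blank]
        simp [List.append_assoc]
      · rw [if_neg hp]
        rw [ih rest (c :: cur) acc (by simp at h ⊢; omega)]
        simp [List.append_assoc]

theorem splitOn_flat (s : List Char) :
    (PySem.Chars.splitOn s ['\n', '\n']).flatMap (fun b => cl (slRec b)) = cl (slRec s) := by
  unfold PySem.Chars.splitOn
  rw [splitOn_go_flat (s.length + 1) s [] [] (by omega)]
  rfl

theorem keep_strip_hash {l : List Char} (h : PySem.Chars.startswith l ['#'] = true) :
    keep (PySem.Chars.strip l) = false := by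
  obtain ⟨t, rfl⟩ : ∃ t, l = '#' :: t := by
    cases l with
    | nil => simp [PySem.Chars.startswith, List.isPrefixOf] at h
    | cons a t =>
      simp only [PySem.Chars.startswith, List.isPrefixOf, Bool.and_eq_true, beq_iff_eq] at h
      exact ⟨t, by rw [h.1]⟩
  have hl : PySem.Chars.lstrip ('#' :: t) = '#' :: t := by
    unfold PySem.Chars.lstrip
    exact List.dropWhile_cons_of_neg (by decide)
  unfold PySem.Chars.strip
  rw [hl]
  unfold PySem.Chars.rstrip
  rw [show ('#' :: t).reverse = t.reverse ++ ['#'] from by simp, List.dropWhile_append]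
  by_cases hd : (t.reverse.dropWhile PySem.Chars.isspace).isEmpty = true
  · rw [if_pos hd]
    decide
  · rw [if_neg hd]
    simp only [List.reverse_append, List.reverse_cons, List.reverse_nil, List.nil_append]
    simp [keep, PySem.Chars.startswith, List.isPrefixOf]

theorem guard_cl_nil {b : List Char}
    (hg : ∀ l ∈ slRec b, PySem.Chars.strip l ≠ [] → PySem.Chars.startswith l ['#'] = true) :
    cl (slRec b) = [] := by
  unfold cl
  rw [List.filter_eq_nil_iff]
  intro x hx
  simp only [List.mem_map] at hx
  obtain ⟨l, hl, rfl⟩ := hx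
  by_cases hs : PySem.Chars.strip l = []
  · rw [hs]; simp [keep]
  · simp [keep_strip_hash (hg l hl hs)]

theorem fold_raw (CL : List (List Char)) : ∀ (acc : List String × List String),
    CL.foldl (fun acc cs =>
      let s := PySem.Chars.strip cs
      if s.isEmpty || PySem.Chars.startswith s ['#'] then acc else step acc s) acc =
    (cl CL).foldl step acc := by
  induction CL with
  | nil => intro acc; rfl
  | cons cs CL ih =>
    intro acc
    rw [List.foldl_cons, cl_cons]
    by_cases hk : keep (PySem.Chars.strip cs) = true
    · have hcond : ((PySem.Chars.strip cs).isEmpty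
          || PySem.Chars.startswith (PySem.Chars.strip cs) ['#']) = false := by
        simp only [keep, Bool.and_eq_true, Bool.not_eq_true'] at hk
        simp [hk.1, hk.2]
      rw [if_pos hk]
      simp only [hcond, Bool.false_eq_true, if_false, List.singleton_append, List.foldl_cons]
      exact ih _
    · have hcond : ((PySem.Chars.strip cs).isEmpty
          || PySem.Chars.startswith (PySem.Chars.strip cs) ['#']) = true := by
        simp only [keep, Bool.and_eq_true, Bool.not_eq_true'] at hk
        rcases Decidable.not_and_iff_not_or_not.mp hk with h | h <;> simp_all
      rw [if_neg hk]
      simp only [hcond, if_true, List.nil_append]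
      exact ih _

theorem foldl_flatMap_foldl {α β γ : Type} (g : α → List β) (f : γ → β → γ) :
    ∀ (bs : List α) (init : γ),
    (bs.flatMap g).foldl f init = bs.foldl (fun a b => (g b).foldl f a) init := by
  intro bs
  induction bs with
  | nil => intro init; rfl
  | cons b bs ih =>
    intro init
    rw [List.flatMap_cons, List.foldl_append, List.foldl_cons]
    exact ih _

theorem parse_B_eq (content : String) :
    parse_prompt_pack_text_alt content = (cl (slRec content.toList)).foldl step ([], []) := by
  unfold parse_prompt_pack_text_alt
  rw [PySem.Str.splitlines, splitlines_eq_slRec, List.foldl_map]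
  rw [show (fun (acc : List String × List String) (cs : List Char) =>
      let s := PySem.Str.strip (String.ofList cs)
      if s = "" ∨ PySem.Str.startswith s "#" = true then acc
      else if PySem.Str.startswith s "neg:" then
        let neg := PySem.Str.strip (PySem.Str.slice s (some 4) none)
        if !(neg = "") then (acc.1, acc.2 ++ [neg]) else acc
      else (acc.1 ++ [s], acc.2)) =
    (fun acc cs =>
      let s := PySem.Chars.strip cs
      if s.isEmpty || PySem.Chars.startswith s ['#'] then acc else step acc s) from ?_]
  · exact fold_raw _ _
  · funext acc cs
    have hs : PySem.Str.strip (String.ofList cs) = String.ofList (PySem.Chars.strip cs) := by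
      simp [PySem.Str.strip]
    rw [hs]
    by_cases h1 : PySem.Chars.strip cs = []
    · rw [h1]; simp
    · by_cases h2 : PySem.Chars.startswith (PySem.Chars.strip cs) ['#'] = true
      · have hL : PySem.Str.startswith (String.ofList (PySem.Chars.strip cs)) "#" = true := by
          simpa [PySem.Str.startswith, show ("#" : String).toList = ['#'] from by decide] using h2
        simp [h2, h1]
      · have h2f : PySem.Chars.startswith (PySem.Chars.strip cs) ['#'] = false := by
          revert h2; cases PySem.Chars.startswith (PySem.Chars.strip cs) ['#'] <;> simp
        have hL : PySem.Str.startswith (String.ofList (PySem.Chars.strip cs)) "#" = false := by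
          simp only [PySem.Str.startswith, String.toList_ofList,
            show ("#" : String).toList = ['#'] from by decide]
          exact h2f
        rw [if_neg (c := (String.ofList (PySem.Chars.strip cs) = "" ∨
              PySem.Str.startswith (String.ofList (PySem.Chars.strip cs)) "#" = true))
            (fun hor => hor.elim (fun h => h1 (by simpa using h))
              (fun h => by rw [hL] at h; cases h))]
        have hrhs : (let s := PySem.Chars.strip cs;
            if (s.isEmpty || PySem.Chars.startswith s ['#']) = true then acc else step acc s)
            = step acc (PySem.Chars.strip cs) := by
          show (if ((PySem.Chars.strip cs).isEmpty
              || PySem.Chars.startswith (PySem.Chars.strip cs) ['#']) = true then acc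
            else step acc (PySem.Chars.strip cs)) = _
          rw [if_neg (by simp [List.isEmpty_iff, h1, h2f])]
        rw [hrhs]
        unfold step
        have hsw : PySem.Str.startswith (String.ofList (PySem.Chars.strip cs)) "neg:"
            = PySem.Chars.startswith (PySem.Chars.strip cs) "neg:".toList := by
          simp [PySem.Str.startswith]
        by_cases h3 : PySem.Chars.startswith (PySem.Chars.strip cs) "neg:".toList = true
        · rw [if_pos (c := (PySem.Str.startswith (String.ofList (PySem.Chars.strip cs)) "neg:" = true))
              (by rw [hsw]; exact h3),
            if_pos (c := (PySem.Chars.startswith (PySem.Chars.strip cs) "neg:".toList = true)) h3]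
          have hneg : PySem.Str.strip (PySem.Str.slice (String.ofList (PySem.Chars.strip cs)) (some 4) none)
              = String.ofList (PySem.Chars.strip (PySem.Chars.slice (PySem.Chars.strip cs) (some 4) none)) := by
            simp [PySem.Str.strip, PySem.Str.slice]
          rw [hneg]
          by_cases h4 : PySem.Chars.strip (PySem.List.slice (PySem.Chars.strip cs) (some 4) none) = []
          · rw [if_neg (by simp [h4]), if_neg (by simp [h4])]
          · rw [if_pos (by simp [h4]), if_pos (by simp [h4])]
        · rw [if_neg (c := (PySem.Str.startswith (String.ofList (PySem.Chars.strip cs)) "neg:" = true))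
              (by rw [hsw]; exact h3),
            if_neg (c := (PySem.Chars.startswith (PySem.Chars.strip cs) "neg:".toList = true)) h3]

theorem str_strip_ofList (l : List Char) :
    PySem.Str.strip (String.ofList l) = String.ofList (PySem.Chars.strip l) := by
  simp [PySem.Str.strip]

theorem ofList_eq_empty_iff (l : List Char) : String.ofList l = "" ↔ l = [] :=
  ⟨fun h => by simpa using congrArg String.toList h, fun h => by rw [h]⟩

theorem innerstep_eq (acc : List String × List String) (y : List Char) :
    (if PySem.Str.startswith (String.ofList y) "neg:" then
      let neg_content := PySem.Str.strip (PySem.Str.slice (String.ofList y) (some 4) none)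
      if !(neg_content = "") then (acc.1, acc.2 ++ [neg_content]) else acc
    else (acc.1 ++ [String.ofList y], acc.2)) = step acc y := by
  unfold step
  have hsw : PySem.Str.startswith (String.ofList y) "neg:"
      = PySem.Chars.startswith y "neg:".toList := by
    simp [PySem.Str.startswith]
  by_cases h3 : PySem.Chars.startswith y "neg:".toList = true
  · rw [if_pos (c := (PySem.Str.startswith (String.ofList y) "neg:" = true)) (by rw [hsw]; exact h3),
      if_pos (c := (PySem.Chars.startswith y "neg:".toList = true)) h3]
    have hneg : PySem.Str.strip (PySem.Str.slice (String.ofList y) (some 4) none)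
        = String.ofList (PySem.Chars.strip (PySem.Chars.slice y (some 4) none)) := by
      simp [PySem.Str.strip, PySem.Str.slice]
    rw [hneg]
    by_cases h4 : PySem.Chars.strip (PySem.List.slice y (some 4) none) = []
    · rw [if_neg (by simp [h4]), if_neg (by simp [h4])]
    · rw [if_pos (by simp [h4]), if_pos (by simp [h4])]
  · rw [if_neg (c := (PySem.Str.startswith (String.ofList y) "neg:" = true)) (by rw [hsw]; exact h3),
      if_neg (c := (PySem.Chars.startswith y "neg:".toList = true)) h3]

theorem blockbody_eq (acc : List String × List String) (bc : List Char) :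
    (let block := PySem.Str.strip (String.ofList bc)
     if block = "" ∨ (((PySem.Str.splitlines block).filter
          (fun line => !(PySem.Str.strip line = ""))).all
          (fun line => PySem.Str.startswith line "#")) = true then acc
     else
      let lines1 := (PySem.Str.splitlines block).map (fun line => PySem.Str.strip line)
      let lines := lines1.filter (fun line => !(line = "") && !(PySem.Str.startswith line "#"))
      lines.foldl (fun acc line =>
        if PySem.Str.startswith line "neg:" then
          let neg_content := PySem.Str.strip (PySem.Str.slice line (some 4) none)
          if !(neg_content = "") then (acc.1, acc.2 ++ [neg_content]) else acc
        else (acc.1 ++ [line], acc.2)) acc)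
    = (cl (slRec (PySem.Chars.strip bc))).foldl step acc := by
  have hs : PySem.Str.strip (String.ofList bc) = String.ofList (PySem.Chars.strip bc) := by
    simp [PySem.Str.strip]
  show (if PySem.Str.strip (String.ofList bc) = "" ∨ _ then acc else _) = _
  rw [hs]
  have hlines : PySem.Str.splitlines (String.ofList (PySem.Chars.strip bc))
      = (slRec (PySem.Chars.strip bc)).map String.ofList := by
    rw [PySem.Str.splitlines, String.toList_ofList, splitlines_eq_slRec]
  rw [hlines]
  have hall : (((slRec (PySem.Chars.strip bc)).map String.ofList).filter
        (fun line => !(PySem.Str.strip line = ""))).all (fun line => PySem.Str.startswith line "#")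
      = ((slRec (PySem.Chars.strip bc)).filter
          (fun l => !(decide (PySem.Chars.strip l = [])))).all
          (fun l => PySem.Chars.startswith l ['#']) := by
    rw [List.filter_map, List.all_map]
    have hp : ((fun (line : String) => !(decide (PySem.Str.strip line = ""))) ∘ String.ofList)
        = (fun l => !(decide (PySem.Chars.strip l = []))) := by
      funext l
      show (!(decide (PySem.Str.strip (String.ofList l) = "")))
          = (!(decide (PySem.Chars.strip l = [])))
      rw [str_strip_ofList]
      have hd : decide (String.ofList (PySem.Chars.strip l) = "")
          = decide (PySem.Chars.strip l = []) :=
        decide_eq_decide.mpr (ofList_eq_empty_iff _)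
      rw [hd]
    have hq : ((fun (line : String) => PySem.Str.startswith line "#") ∘ String.ofList)
        = (fun l => PySem.Chars.startswith l ['#']) := by
      funext l
      simp [PySem.Str.startswith, show ("#" : String).toList = ['#'] from by decide]
    rw [hp, hq]
  rw [hall]
  by_cases hg : (String.ofList (PySem.Chars.strip bc) = "" ∨
      (((slRec (PySem.Chars.strip bc)).filter
          (fun l => !(decide (PySem.Chars.strip l = [])))).all
          (fun l => PySem.Chars.startswith l ['#'])) = true)
  · rw [if_pos hg]
    rcases hg with hg | hg
    · have : PySem.Chars.strip bc = [] := by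
        have := congrArg String.toList hg; simpa using this
      rw [this]
      rfl
    · rw [guard_cl_nil (fun l hl hsne => by
        have hmem : l ∈ (slRec (PySem.Chars.strip bc)).filter
            (fun l => !(decide (PySem.Chars.strip l = []))) :=
          List.mem_filter.mpr ⟨hl, by simp [hsne]⟩
        exact List.all_eq_true.mp hg _ hmem)]
      rfl
  · rw [if_neg hg]
    show ((((slRec (PySem.Chars.strip bc)).map String.ofList).map
        (fun line => PySem.Str.strip line)).filter
        (fun line => !(line = "") && !(PySem.Str.startswith line "#"))).foldl _ acc = _
    rw [List.map_map,
      show ((fun line => PySem.Str.strip line) ∘ String.ofList)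
          = (String.ofList ∘ PySem.Chars.strip) from by
        funext l; simp [PySem.Str.strip],
      ← List.map_map, List.filter_map,
      show ((fun (line : String) => !(decide (line = "")) && !(PySem.Str.startswith line "#"))
          ∘ String.ofList) = keep from by
        funext y
        simp only [Function.comp_apply, keep]
        congr 1
        · have hd : decide (String.ofList y = "") = decide (y = []) :=
            decide_eq_decide.mpr (ofList_eq_empty_iff y)
          rw [hd]; cases y <;> simp
        · simp [PySem.Str.startswith, show ("#" : String).toList = ['#'] from by decide]]
    rw [show ((slRec (PySem.Chars.strip bc)).map PySem.Chars.strip).filter keep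
        = cl (slRec (PySem.Chars.strip bc)) from rfl]
    rw [List.foldl_map]
    have : (fun (acc : List String × List String) y =>
        if PySem.Str.startswith (String.ofList y) "neg:" then
          let neg_content := PySem.Str.strip (PySem.Str.slice (String.ofList y) (some 4) none)
          if !(neg_content = "") then (acc.1, acc.2 ++ [neg_content]) else acc
        else (acc.1 ++ [String.ofList y], acc.2)) = step := by
      funext a y
      exact innerstep_eq a y
    rw [this]

theorem parse_A_eq (content : String) :
    parse_prompt_pack_text content = (cl (slRec content.toList)).foldl step ([], []) := by
  unfold parse_prompt_pack_text
  have hsplit : (PySem.Str.split? content "\n\n").getD []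
      = (PySem.Chars.splitOn content.toList ['\n', '\n']).map String.ofList := by
    simp [PySem.Str.split?, PySem.Chars.split?,
      show ("\n\n" : String).toList = ['\n', '\n'] from by decide]
  rw [hsplit, List.foldl_map]
  rw [show (fun (acc : List String × List String) bc =>
      (fun (acc : List String × List String) block0 =>
        let block := PySem.Str.strip block0
        if block = "" ∨ (((PySem.Str.splitlines block).filter
              (fun line => !(PySem.Str.strip line = ""))).all
              (fun line => PySem.Str.startswith line "#")) = true then acc
        else
          let lines1 := (PySem.Str.splitlines block).map (fun line => PySem.Str.strip line)
          let lines := lines1.filter (fun line => !(line = "") && !(PySem.Str.startswith line "#"))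
          lines.foldl (fun acc line =>
            if PySem.Str.startswith line "neg:" then
              let neg_content := PySem.Str.strip (PySem.Str.slice line (some 4) none)
              if !(neg_content = "") then (acc.1, acc.2 ++ [neg_content]) else acc
            else (acc.1 ++ [line], acc.2)) acc) acc (String.ofList bc))
      = (fun acc bc => (cl (slRec (PySem.Chars.strip bc))).foldl step acc) from
    funext (fun acc => funext (fun bc => blockbody_eq acc bc))]
  rw [← foldl_flatMap_foldl]
  rw [show (fun bc => cl (slRec (PySem.Chars.strip bc))) = (fun b => cl (slRec b)) from
    funext (fun b => cl_slRec_strip b)]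
  rw [splitOn_flat]

-- ===== VERDICT (by name: the statement is the Claim_ definition above) =====
theorem parse_prompt_pack_text_spec : Claim_equal_parse_prompt_pack_text := by
  intro content _
  unfold Spec_parse_prompt_pack_text
  rw [parse_A_eq, parse_B_eq]
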